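-- pv_equiv track=rewrite | github.com/ai-meharbnsingh/astro_rattan | app/panchang_nivas.py | calculate_chandra_vasa
-- ===== SOURCE A (Python) =====
-- from typing import Any, Dict, List
--
-- CHANDRA_VASA_RANGES: List[tuple[range, str, str]] = [
--     (range(0, 7),   "East",  "पूर्व"),
--     (range(7, 14),  "South", "दक्षिण"),
--     (range(14, 21), "West",  "पश्चिम"),
--     (range(21, 27), "North", "उत्तर"),
-- ]
--
-- def calculate_chandra_vasa(nakshatra_index: int) -> Dict[str, Any]:
--     """
--     Return Moon's directional residence (Chandra Vasa) for a nakshatra.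
--
--     Parameters
--     ----------
--     nakshatra_index : int
--         0-based nakshatra index (0 = Ashwini, ... 26 = Revati)
--
--     Returns
--     -------
--     dict with keys: direction, direction_hindi, name, name_hindi
--     """
--     idx = nakshatra_index % 27
--     direction = "East"
--     direction_hindi = "पूर्व"
--     for rng, d_en, d_hi in CHANDRA_VASA_RANGES:
--         if idx in rng:
--             direction = d_en
--             direction_hindi = d_hi
--             break
--     return {
--         "direction": direction,
--         "direction_hindi": direction_hindi,
--         "name": "Chandra Vasa",
--         "name_hindi": "चन्द्र वास",
--     }
-- ===== SOURCE B (Python) =====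
-- CHANDRA_VASA_DIRS = [
--     ("East", "पूर्व"),
--     ("South", "दक्षिण"),
--     ("West", "पश्चिम"),
--     ("North", "उत्तर"),
-- ]
--
-- def calculate_chandra_vasa(nakshatra_index: int):
--     idx = nakshatra_index % 27
--     d_en, d_hi = CHANDRA_VASA_DIRS[idx // 7]
--     return {
--         "direction": d_en,
--         "direction_hindi": d_hi,
--         "name": "Chandra Vasa",
--         "name_hindi": "चन्द्र वास",
--     }
-- ===== Notes on version B (the rewrite author's own statement) =====
-- stated objective: simpler
-- what changed: Replaces the loop over range objects with membership tests and a break by a closed-form arithmetic bucket index (the reduced nakshatra index floor-divided by the range width) into a four-entry direction table.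
import Mathlib
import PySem

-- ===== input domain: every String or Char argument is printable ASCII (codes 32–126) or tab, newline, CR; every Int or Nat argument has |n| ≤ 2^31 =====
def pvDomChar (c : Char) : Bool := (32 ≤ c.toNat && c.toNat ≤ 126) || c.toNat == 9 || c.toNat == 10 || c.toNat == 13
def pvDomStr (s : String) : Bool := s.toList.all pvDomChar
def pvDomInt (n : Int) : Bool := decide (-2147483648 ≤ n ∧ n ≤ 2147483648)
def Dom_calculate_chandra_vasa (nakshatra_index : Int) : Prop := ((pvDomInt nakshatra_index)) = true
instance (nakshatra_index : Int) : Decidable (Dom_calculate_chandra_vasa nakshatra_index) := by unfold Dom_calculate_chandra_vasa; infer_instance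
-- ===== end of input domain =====

-- B replaces A's loop over ranges with a closed-form arithmetic bucket index into a direction table (simpler).

-- ===== PORT A =====
-- CHANDRA_VASA_RANGES: each range(a, b) is represented by its bounds (a, b); membership = a ≤ idx < b.
def cvRangesA : List (Int × Int × String × String) :=
  [(0, 7, "East", "पूर्व"), (7, 14, "South", "दक्षिण"),
   (14, 21, "West", "पश्चिम"), (21, 27, "North", "उत्तर")]

-- the for-loop with break: first matching range wins, else keep the defaults
def cvLoopA (idx : Int) : List (Int × Int × String × String) → String × String → String × String
  | [], acc => acc
  | (lo, hi, dEn, dHi) :: rest, acc =>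
      if lo ≤ idx ∧ idx < hi then (dEn, dHi) else cvLoopA idx rest acc

def calculate_chandra_vasa (nakshatra_index : Int) : List (String × String) :=
  let idx := PySem.Int.mod nakshatra_index 27
  let dir := cvLoopA idx cvRangesA ("East", "पूर्व")
  [("direction", dir.1), ("direction_hindi", dir.2),
   ("name", "Chandra Vasa"), ("name_hindi", "चन्द्र वास")]

-- ===== PORT B =====
def cvDirsB : List (String × String) :=
  [("East", "पूर्व"), ("South", "दक्षिण"), ("West", "पश्चिम"), ("North", "उत्तर")]

def calculate_chandra_vasa_alt (nakshatra_index : Int) : List (String × String) :=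
  let idx := PySem.Int.mod nakshatra_index 27
  -- CHANDRA_VASA_DIRS[idx // 7]; the bucket index is always in range, so pyGet? never yields none
  let dir := (PySem.List.pyGet? cvDirsB (PySem.Int.floordiv idx 7)).getD ("", "")
  [("direction", dir.1), ("direction_hindi", dir.2),
   ("name", "Chandra Vasa"), ("name_hindi", "चन्द्र वास")]

-- ===== PRECONDITION & SPEC =====
def Spec_calculate_chandra_vasa (nakshatra_index : Int) (out : List (String × String)) : Prop := out = calculate_chandra_vasa_alt nakshatra_index
instance (nakshatra_index : Int) (out : List (String × String)) : Decidable (Spec_calculate_chandra_vasa nakshatra_index out) := by unfold Spec_calculate_chandra_vasa; infer_instance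

-- ===== CLAIM (what is proved, stated in full; the proofs are below) =====
def Claim_equal_calculate_chandra_vasa : Prop := ∀ (nakshatra_index : Int), Dom_calculate_chandra_vasa nakshatra_index → Spec_calculate_chandra_vasa nakshatra_index (calculate_chandra_vasa nakshatra_index)

-- ===== LEMMAS AND PROOFS =====
theorem cv_eq_of_bounds (m : Int) (h0 : 0 ≤ m) (h27 : m < 27) :
    cvLoopA m cvRangesA ("East", "पूर्व")
      = (PySem.List.pyGet? cvDirsB (PySem.Int.floordiv m 7)).getD ("", "") := by
  interval_cases m <;> decide

-- ===== VERDICT (by name: the statement is the Claim_ definition above) =====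
theorem calculate_chandra_vasa_spec : Claim_equal_calculate_chandra_vasa := by
  intro n _
  show _ = _
  unfold calculate_chandra_vasa calculate_chandra_vasa_alt
  have hm : PySem.Int.mod n 27 = n % 27 := PySem.Int.mod_eq_emod_of_pos (by norm_num)
  have h0 : 0 ≤ PySem.Int.mod n 27 := by rw [hm]; exact Int.emod_nonneg n (by norm_num)
  have h27 : PySem.Int.mod n 27 < 27 := by rw [hm]; exact Int.emod_lt_of_pos n (by norm_num)
  simp only [cv_eq_of_bounds _ h0 h27]
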